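-- pv_equiv track=rewrite | github.com/Mati2206/Matura-Informatyka | czerwiec 2023 formuła 2015/zad1.py | dobre_przyjaciolki
-- ===== SOURCE A (Python) =====
-- def myStr(a):
--     tab = []
--     m = 0
--     while a >= 10:
--         tab.append(a%10)
--         m += 1
--         a //= 10
--     tab.append(a)
--     return tab, m
--
-- def dobre_przyjaciolki(a, b):
--     a, ma = myStr(a)
--     b, mb = myStr(b)
--     suma, sumb = 0, 0
--     for i in a:
--         suma += i
--     for i in b:
--         sumb += i
--     if ((a[0] == b[mb] or b[0] == a[ma]) and suma == sumb):
--         return True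
--     return False
-- ===== SOURCE B (Python) =====
-- def dobre_przyjaciolki(a, b):
--     # One recursive pass per number computing (digit sum, first digit, last digit);
--     # no digit list is built and no separate summation loops are needed.
--     def digits_info(n):
--         if n < 10:
--             return n, n, n
--         s, f, _ = digits_info(n // 10)
--         return s + n % 10, f, n % 10
--     sa, fa, la = digits_info(a)
--     sb, fb, lb = digits_info(b)
--     return sa == sb and (la == fb or lb == fa)
-- ===== Notes on version B (the rewrite author's own statement) =====
-- stated objective: simpler
-- what changed: Replaces the digit-list builder (while loop appending digits) plus two separate summation loops and index arithmetic with one recursive pass per number that directly returns (digit sum, first digit, last digit), building no list at all.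
import Mathlib
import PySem

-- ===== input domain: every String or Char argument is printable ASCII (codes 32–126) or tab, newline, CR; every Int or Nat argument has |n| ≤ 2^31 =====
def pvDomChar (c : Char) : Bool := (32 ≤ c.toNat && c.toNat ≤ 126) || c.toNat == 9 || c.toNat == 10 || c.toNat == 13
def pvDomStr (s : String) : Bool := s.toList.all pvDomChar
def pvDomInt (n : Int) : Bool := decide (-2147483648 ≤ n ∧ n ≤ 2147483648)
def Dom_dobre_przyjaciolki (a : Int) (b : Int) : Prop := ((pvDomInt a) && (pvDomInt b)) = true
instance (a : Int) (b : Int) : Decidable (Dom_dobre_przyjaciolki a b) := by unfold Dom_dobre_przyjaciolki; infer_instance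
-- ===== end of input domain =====

-- B replaces A's digit-list builder + two summation loops + indexing by one recursive
-- pass per number returning (digit sum, first digit, last digit): simpler, same cost.

-- ===== PORT A =====
-- the while loop of myStr, state (tab, m, a); returns Python's (tab, m)
def myStrLoop (tab : List Int) (m : Int) (a : Int) : List Int × Int :=
  if a ≥ 10 then
    myStrLoop (tab ++ [PySem.Int.mod a 10]) (m + 1) (PySem.Int.floordiv a 10)
  else
    (tab ++ [a], m)
termination_by a.toNat
decreasing_by
  rw [PySem.Int.floordiv_eq_ediv_of_pos (by norm_num : (0:Int) < 10)]
  omega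

def dobre_przyjaciolki (a : Int) (b : Int) : Bool :=
  let ra := myStrLoop [] 0 a
  let rb := myStrLoop [] 0 b
  let suma := ra.1.foldl (· + ·) 0
  let sumb := rb.1.foldl (· + ·) 0
  -- indices 0, ma, mb are always in range (tab has m+1 elements), so pyGet? is some
  if (PySem.List.pyGet? ra.1 0 == PySem.List.pyGet? rb.1 rb.2
        || PySem.List.pyGet? rb.1 0 == PySem.List.pyGet? ra.1 ra.2)
      && suma == sumb then true else false

-- ===== PORT B =====
-- (digit sum, first digit, last digit) of n, one recursive pass
def digitsInfo (n : Int) : Int × Int × Int :=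
  if n < 10 then (n, n, n)
  else
    let r := digitsInfo (PySem.Int.floordiv n 10)
    (r.1 + PySem.Int.mod n 10, r.2.1, PySem.Int.mod n 10)
termination_by n.toNat
decreasing_by
  rw [PySem.Int.floordiv_eq_ediv_of_pos (by norm_num : (0:Int) < 10)]
  omega

def dobre_przyjaciolki_alt (a : Int) (b : Int) : Bool :=
  let da := digitsInfo a
  let db := digitsInfo b
  (da.1 == db.1) && ((da.2.2 == db.2.1) || (db.2.2 == da.2.1))

-- ===== PRECONDITION & SPEC =====
def Spec_dobre_przyjaciolki (a : Int) (b : Int) (out : Bool) : Prop := out = dobre_przyjaciolki_alt a b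
instance (a : Int) (b : Int) (out : Bool) : Decidable (Spec_dobre_przyjaciolki a b out) := by unfold Spec_dobre_przyjaciolki; infer_instance

-- ===== CLAIM (what is proved, stated in full; the proofs are below) =====
def Claim_equal_dobre_przyjaciolki : Prop := ∀ (a : Int) (b : Int), Dom_dobre_przyjaciolki a b → Spec_dobre_przyjaciolki a b (dobre_przyjaciolki a b)

-- ===== LEMMAS AND PROOFS =====

theorem foldl_add_init (l : List Int) (x : Int) :
    l.foldl (· + ·) x = x + l.foldl (· + ·) 0 := by
  induction l generalizing x with
  | nil => simp
  | cons h t ih =>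
    simp only [List.foldl]
    rw [ih (x + h), ih (0 + h)]
    ring

theorem myStrLoop_append (tab : List Int) (m : Int) (a : Int) :
    myStrLoop tab m a = (tab ++ (myStrLoop [] 0 a).1, m + (myStrLoop [] 0 a).2) := by
  by_cases h : a ≥ 10
  · rw [myStrLoop, if_pos h,
        myStrLoop_append (tab ++ [PySem.Int.mod a 10]) (m + 1) (PySem.Int.floordiv a 10)]
    conv_rhs => rw [myStrLoop, if_pos h,
        myStrLoop_append ([] ++ [PySem.Int.mod a 10]) (0 + 1) (PySem.Int.floordiv a 10)]
    simp [List.append_assoc]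
    ring
  · rw [myStrLoop, if_neg h]
    conv_rhs => rw [myStrLoop, if_neg h]
    simp
termination_by a.toNat
decreasing_by
  all_goals rw [PySem.Int.floordiv_eq_ediv_of_pos (by norm_num : (0:Int) < 10)]; omega

theorem myStr_spec (a : Int) :
    (myStrLoop [] 0 a).1 ≠ [] ∧
    (myStrLoop [] 0 a).2 = ((myStrLoop [] 0 a).1.length : Int) - 1 ∧
    (myStrLoop [] 0 a).1.foldl (· + ·) 0 = (digitsInfo a).1 ∧
    (myStrLoop [] 0 a).1.head? = some (digitsInfo a).2.2 ∧
    (myStrLoop [] 0 a).1.getLast? = some (digitsInfo a).2.1 := by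
  by_cases h : a ≥ 10
  · have ih := myStr_spec (PySem.Int.floordiv a 10)
    obtain ⟨hne, hm, hs, hh, hl⟩ := ih
    rw [myStrLoop, if_pos h,
        myStrLoop_append ([] ++ [PySem.Int.mod a 10]) (0 + 1) (PySem.Int.floordiv a 10)]
    rw [digitsInfo, if_neg (by omega : ¬ a < 10)]
    have hlen : 0 < (myStrLoop [] 0 (PySem.Int.floordiv a 10)).1.length :=
      List.length_pos_of_ne_nil hne
    refine ⟨by simp, ?_, ?_, ?_, ?_⟩
    · simp only [List.nil_append, List.singleton_append, List.length_cons]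
      push_cast
      omega
    · simp only [List.nil_append, List.singleton_append, List.foldl_cons]
      rw [foldl_add_init _ (0 + PySem.Int.mod a 10), hs]
      ring
    · simp
    · cases hT : (myStrLoop [] 0 (PySem.Int.floordiv a 10)).1 with
      | nil => exact absurd hT hne
      | cons x xs =>
        rw [hT] at hl
        simp only [List.nil_append, List.singleton_append, List.getLast?_cons_cons]
        exact hl
  · rw [myStrLoop, if_neg h, digitsInfo, if_pos (by omega : a < 10)]
    simp
termination_by a.toNat
decreasing_by
  rw [PySem.Int.floordiv_eq_ediv_of_pos (by norm_num : (0:Int) < 10)]; omega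

-- ===== VERDICT (by name: the statement is the Claim_ definition above) =====
theorem dobre_przyjaciolki_spec : Claim_equal_dobre_przyjaciolki := by
  intro a b _
  unfold Spec_dobre_przyjaciolki dobre_przyjaciolki dobre_przyjaciolki_alt
  obtain ⟨hane, ham, has, hah, hal⟩ := myStr_spec a
  obtain ⟨hbne, hbm, hbs, hbh, hbl⟩ := myStr_spec b
  have halen := List.length_pos_of_ne_nil hane
  have hblen := List.length_pos_of_ne_nil hbne
  have ga0 : PySem.List.pyGet? (myStrLoop [] 0 a).1 0 = some (digitsInfo a).2.2 := by
    rw [PySem.List.pyGet?_zero, ← List.head?_eq_getElem?, hah]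
  have gb0 : PySem.List.pyGet? (myStrLoop [] 0 b).1 0 = some (digitsInfo b).2.2 := by
    rw [PySem.List.pyGet?_zero, ← List.head?_eq_getElem?, hbh]
  have gam : PySem.List.pyGet? (myStrLoop [] 0 a).1 (myStrLoop [] 0 a).2
      = some (digitsInfo a).2.1 := by
    rw [ham]
    have : ((myStrLoop [] 0 a).1.length : Int) - 1
        = (((myStrLoop [] 0 a).1.length - 1 : Nat) : Int) := by omega
    rw [this, PySem.List.pyGet?_natCast, ← List.getLast?_eq_getElem?, hal]
  have gbm : PySem.List.pyGet? (myStrLoop [] 0 b).1 (myStrLoop [] 0 b).2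
      = some (digitsInfo b).2.1 := by
    rw [hbm]
    have : ((myStrLoop [] 0 b).1.length : Int) - 1
        = (((myStrLoop [] 0 b).1.length - 1 : Nat) : Int) := by omega
    rw [this, PySem.List.pyGet?_natCast, ← List.getLast?_eq_getElem?, hbl]
  simp only [ga0, gb0, gam, gbm, has, hbs, Option.some_beq_some]
  cases hEq : (digitsInfo a).1 == (digitsInfo b).1 <;>
  cases h1 : (digitsInfo a).2.2 == (digitsInfo b).2.1 <;>
  cases h2 : (digitsInfo b).2.2 == (digitsInfo a).2.1 <;> simp
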